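-- pv_equiv track=rewrite | github.com/gawon03/Algorithm | 프로그래머스/1/42862. 체육복/체육복.py | solution
-- ===== SOURCE A (Python) =====
-- def solution(n, lost, reserve):
--     lost.sort()
--     reserve.sort()
--     union = set(lost)&set(reserve)
--     idx = 0; cnt =0
--     for r in reserve:
--         if r not in union :
--             for i in range(idx, len(lost)):
--                 if (abs(r-lost[i]) == 1) & (lost[i] not in union):
--                     idx = i + 1
--                     cnt += 1
--                     break
--     return n - len(lost) + cnt + len(list(union))
-- ===== SOURCE B (Python) =====
-- def solution(n, lost, reserve):
--     both = set(lost) & set(reserve)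
--     avail = {}
--     for x in lost:
--         if x not in both:
--             avail[x] = avail.get(x, 0) + 1
--     cnt = 0
--     for r in sorted(x for x in reserve if x not in both):
--         if avail.get(r - 1, 0) > 0:
--             avail[r - 1] -= 1
--             cnt += 1
--         elif avail.get(r + 1, 0) > 0:
--             avail[r + 1] -= 1
--             cnt += 1
--     return n - len(lost) + cnt + len(both)
-- ===== Notes on version B (the rewrite author's own statement) =====
-- stated objective: faster
-- what changed: B replaces A's sort-both-lists two-pointer scheme (an inner index loop rescanning the sorted lost list for every reserve element) by a dict multiplicity counter of the non-common lost entries and a single pass over the sorted non-common reserves with O(1) neighbour lookups, taking r-1 before r+1; this removes the O(r*l) inner rescans.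
import Mathlib
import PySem

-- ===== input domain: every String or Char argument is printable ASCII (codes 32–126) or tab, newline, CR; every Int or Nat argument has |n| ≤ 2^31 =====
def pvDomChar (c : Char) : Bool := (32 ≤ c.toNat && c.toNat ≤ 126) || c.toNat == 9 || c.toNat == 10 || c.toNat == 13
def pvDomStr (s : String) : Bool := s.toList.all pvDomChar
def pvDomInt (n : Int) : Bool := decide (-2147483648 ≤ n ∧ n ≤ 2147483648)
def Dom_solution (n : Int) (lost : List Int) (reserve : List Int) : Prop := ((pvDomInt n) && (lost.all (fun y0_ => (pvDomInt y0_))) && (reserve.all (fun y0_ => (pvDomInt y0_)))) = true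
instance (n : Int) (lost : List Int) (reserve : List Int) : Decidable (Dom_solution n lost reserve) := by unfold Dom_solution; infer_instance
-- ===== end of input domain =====

-- B: a dict multiplicity counter of unmatched lost entries and one pass over the sorted
-- non-common reserves with O(1) neighbour lookups (r-1 preferred, then r+1), instead of A's
-- index-pointer rescans of the sorted lost list (objective: alternative).  A sorts `lost`
-- and `reserve` in place; the equivalence proved here is about the RETURN value only.


-- ===== PORT A =====
-- inner loop 'for i in range(idx, len(lost)): if (abs(r-lost[i])==1)&(lost[i] not in union): idx=i+1; cnt+=1; break'
def solFind (lost : List Int) (union : PySem.Set Int) (r : Int) (i : Nat) : Option Nat :=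
  if h : i < lost.length then
    if ((r - lost[i]).natAbs == 1) && !(PySem.Set.contains union lost[i]) then some i
    else solFind lost union r (i + 1)
  else none
termination_by lost.length - i

def solution (n : Int) (lost : List Int) (reserve : List Int) : Int :=
  let lostS := PySem.List.sorted lost (fun x => x)
  let reserveS := PySem.List.sorted reserve (fun x => x)
  let union := PySem.Set.inter (PySem.Set.ofList lostS) (PySem.Set.ofList reserveS)
  let st := reserveS.foldl (fun (st : Nat × Int) r =>
      if !(PySem.Set.contains union r) then
        match solFind lostS union r st.1 with
        | some i => (i + 1, st.2 + 1)
        | none => st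
      else st) (0, 0)
  n - lostS.length + st.2 + union.length

-- ===== PORT B =====
def solution_alt (n : Int) (lost : List Int) (reserve : List Int) : Int :=
  let both := PySem.Set.inter (PySem.Set.ofList lost) (PySem.Set.ofList reserve)
  let avail := lost.foldl (fun (d : PySem.Dict Int Int) x =>
      if !(PySem.Set.contains both x) then d.insert x (d.getD x 0 + 1) else d) PySem.Dict.empty
  let st := (PySem.List.sorted (reserve.filter (fun x => !(PySem.Set.contains both x))) (fun x => x)).foldl
      (fun (st : PySem.Dict Int Int × Int) r =>
        if st.1.getD (r - 1) 0 > 0 then (st.1.insert (r - 1) (st.1.getD (r - 1) 0 - 1), st.2 + 1)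
        else if st.1.getD (r + 1) 0 > 0 then (st.1.insert (r + 1) (st.1.getD (r + 1) 0 - 1), st.2 + 1)
        else st) (avail, 0)
  n - lost.length + st.2 + both.length


-- ===== PRECONDITION & SPEC =====
def Spec_solution (n : Int) (lost : List Int) (reserve : List Int) (out : Int) : Prop := out = solution_alt n lost reserve
instance (n : Int) (lost : List Int) (reserve : List Int) (out : Int) : Decidable (Spec_solution n lost reserve out) := by unfold Spec_solution; infer_instance

-- ===== CLAIM (what is proved, stated in full; the proofs are below) =====
def Claim_equal_solution : Prop := ∀ (n : Int) (lost : List Int) (reserve : List Int), Dom_solution n lost reserve → Spec_solution n lost reserve (solution n lost reserve)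

-- ===== LEMMAS AND PROOFS =====

def qPred (U : PySem.Set Int) (r x : Int) : Bool :=
  ((r - x).natAbs == 1) && !(PySem.Set.contains U x)

def findSplit (q : Int → Bool) : List Int → Option (Int × List Int)
  | [] => none
  | x :: xs => if q x then some (x, xs) else findSplit q xs

def cntA (U : PySem.Set Int) (M : List Int) (rs : List Int) : Int :=
  match rs with
  | [] => 0
  | r :: rest =>
    if PySem.Set.contains U r then cntA U M rest
    else match findSplit (qPred U r) M with
      | some (_, M') => 1 + cntA U M' rest
      | none => cntA U M rest

lemma solFind_split (lost : List Int) (U : PySem.Set Int) (r : Int) : ∀ i,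
    (match solFind lost U r i with
     | none => findSplit (qPred U r) (lost.drop i) = none
     | some j => ∃ v, findSplit (qPred U r) (lost.drop i) = some (v, lost.drop (j + 1))) := by
  intro i
  induction i using solFind.induct lost U r with
  | case1 i h hcond =>
    rw [solFind, dif_pos h, if_pos hcond]
    refine ⟨lost[i], ?_⟩
    rw [List.drop_eq_getElem_cons h, findSplit, if_pos (show qPred U r lost[i] = true from hcond)]
  | case2 i h hcond ih =>
    rw [solFind, dif_pos h, if_neg hcond]
    rw [List.drop_eq_getElem_cons h, findSplit,
        if_neg (show ¬ qPred U r lost[i] = true from hcond)]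
    exact ih
  | case3 i h =>
    rw [solFind, dif_neg h]
    rw [List.drop_eq_nil_of_le (by omega)]
    rfl

lemma foldA_eq_cntA (lostS : List Int) (U : PySem.Set Int) : ∀ (rs : List Int) (i : Nat) (c : Int),
    (rs.foldl (fun (st : Nat × Int) r =>
      if !(PySem.Set.contains U r) then
        match solFind lostS U r st.1 with
        | some i => (i + 1, st.2 + 1)
        | none => st
      else st) (i, c)).2 = c + cntA U (lostS.drop i) rs := by
  intro rs
  induction rs with
  | nil => intro i c; simp [cntA]
  | cons r rest ih =>
    intro i c
    set f := (fun (st : Nat × Int) r =>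
      if !(PySem.Set.contains U r) then
        match solFind lostS U r st.1 with
        | some i => (i + 1, st.2 + 1)
        | none => st
      else st) with hf0
    rw [List.foldl_cons]
    by_cases hU : PySem.Set.contains U r = true
    · have hUm : r ∈ U := (PySem.Set.contains_iff U r).mp hU
      have hstep : f (i, c) r = (i, c) := by rw [hf0]; simp [hUm]
      rw [hstep, cntA, if_pos hU, ih]
    · have hUm : r ∉ U := fun hm => hU ((PySem.Set.contains_iff U r).mpr hm)
      have hsplit := solFind_split lostS U r i
      cases hf : solFind lostS U r i with
      | none =>
        rw [hf] at hsplit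
        have hstep : f (i, c) r = (i, c) := by rw [hf0]; simp [hUm, hf]
        rw [hstep, cntA, if_neg hU, hsplit, ih]
      | some j =>
        rw [hf] at hsplit
        obtain ⟨v, hv⟩ := hsplit
        have hstep : f (i, c) r = (j + 1, c + 1) := by rw [hf0]; simp [hUm, hf]
        rw [hstep, cntA, if_neg hU, hv, ih]
        ring

lemma cntA_filter (U : PySem.Set Int) : ∀ (rs : List Int) (M : List Int),
    cntA U M rs = cntA U M (rs.filter (fun r => !(PySem.Set.contains U r))) := by
  intro rs
  induction rs with
  | nil => intro M; simp
  | cons r rest ih =>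
    intro M
    rw [List.filter_cons]
    by_cases hU : PySem.Set.contains U r = true
    · have hUm : r ∈ U := (PySem.Set.contains_iff U r).mp hU
      rw [cntA, if_pos hU, if_neg (by simpa using hUm), ih]
    · have hUm : r ∉ U := fun hm => hU ((PySem.Set.contains_iff U r).mpr hm)
      rw [if_pos (by simpa using hUm), cntA, if_neg hU, cntA, if_neg hU]
      cases findSplit (qPred U r) M with
      | none => exact ih M
      | some p =>
        obtain ⟨v, M'⟩ := p
        show 1 + cntA U M' rest = 1 + cntA U M' (List.filter (fun r => !(PySem.Set.contains U r)) rest)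
        rw [ih]


lemma findSplit_eq_none_iff (q : Int → Bool) (M : List Int) :
    findSplit q M = none ↔ ∀ x ∈ M, q x = false := by
  induction M with
  | nil => simp [findSplit]
  | cons x xs ih =>
    simp only [findSplit]
    by_cases h : q x <;> simp [h, ih]

lemma findSplit_eq_some (q : Int → Bool) : ∀ (M : List Int) (v : Int) (M' : List Int),
    findSplit q M = some (v, M') →
    ∃ pre, M = pre ++ v :: M' ∧ q v = true ∧ ∀ x ∈ pre, q x = false := by
  intro M
  induction M with
  | nil => intro v M' h; simp [findSplit] at h
  | cons x xs ih =>
    intro v M' h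
    simp only [findSplit] at h
    by_cases hx : q x
    · simp [hx] at h
      exact ⟨[], by simp [h.1, h.2], by simp [← h.1, hx], by simp⟩
    · simp [hx] at h
      obtain ⟨pre, hpre, hv, hall⟩ := ih v M' h
      exact ⟨x :: pre, by simp [hpre], hv, by
        intro y hy; rcases List.mem_cons.mp hy with rfl | hy
        · simpa using hx
        · exact hall y hy⟩

lemma main_count (U : PySem.Set Int) : ∀ (rs : List Int), rs.Pairwise (· ≤ ·) →
    ∀ (M : List Int) (D : PySem.Dict Int Int), M.Pairwise (· ≤ ·) →
    (∀ x : Int, x ∉ U → (M.count x : Int) ≤ D.getD x 0) →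
    (∀ s : Int, ((M.count s : Int) < D.getD s 0 ∨ (s ∈ U ∧ 0 < D.getD s 0)) →
        ∀ r ∈ rs, s ≠ r - 1 ∧ s ≠ r + 1) →
    (∀ r ∈ rs, r ∉ M ∧ r ∉ U) →
    ∀ (c : Int),
    (rs.foldl (fun (st : PySem.Dict Int Int × Int) r =>
        if st.1.getD (r - 1) 0 > 0 then (st.1.insert (r - 1) (st.1.getD (r - 1) 0 - 1), st.2 + 1)
        else if st.1.getD (r + 1) 0 > 0 then (st.1.insert (r + 1) (st.1.getD (r + 1) 0 - 1), st.2 + 1)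
        else st) (D, c)).2 = c + cntA U M rs := by
  intro rs
  induction rs with
  | nil => intro _ M D _ _ _ _ c; simp [cntA]
  | cons r rest ih =>
    intro hrs M D hM hcnt hdead hrsMU c
    have hr_rest : ∀ r' ∈ rest, r ≤ r' := (List.pairwise_cons.mp hrs).1
    have hrs' := (List.pairwise_cons.mp hrs).2
    obtain ⟨hrM, hrU⟩ := hrsMU r (List.mem_cons_self)
    have hrUc : ¬ PySem.Set.contains U r = true :=
      fun h => hrU ((PySem.Set.contains_iff U r).mp h)
    -- positivity of a neighbour's counter is exactly availability in M
    have hpos_iff : ∀ w : Int, (w = r - 1 ∨ w = r + 1) →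
        (0 < D.getD w 0 ↔ (w ∈ M ∧ w ∉ U)) := by
      intro w hw
      constructor
      · intro hpos
        by_cases hx : (M.count w : Int) < D.getD w 0 ∨ (w ∈ U ∧ 0 < D.getD w 0)
        · have := hdead w hx r (List.mem_cons_self)
          omega
        · push_neg at hx
          have h1 : (D.getD w 0 : Int) ≤ M.count w := hx.1
          have h2 : w ∉ U := by
            intro hwU
            exact absurd hpos (by simpa using hx.2 hwU)
          have : 0 < M.count w := by omega
          exact ⟨List.count_pos_iff.mp (by omega), h2⟩
      · intro ⟨hwM, hwU⟩
        have h1 := hcnt w hwU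
        have h2 : 0 < M.count w := List.count_pos_iff.mpr hwM
        omega
    rw [List.foldl_cons, cntA, if_neg hrUc]
    cases hfs : findSplit (qPred U r) M with
    | none =>
      have hnone := (findSplit_eq_none_iff _ _).mp hfs
      have hnotav : ∀ w : Int, (w = r - 1 ∨ w = r + 1) → ¬ (w ∈ M ∧ w ∉ U) := by
        intro w hw ⟨hwM, hwU⟩
        have hq := hnone w hwM
        simp [qPred] at hq
        exact hwU (hq (by omega))
      have h1 : ¬ (D.getD (r - 1) 0 > 0) := by
        intro hpos
        exact hnotav (r - 1) (Or.inl rfl) ((hpos_iff (r - 1) (Or.inl rfl)).mp hpos)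
      have h2 : ¬ (D.getD (r + 1) 0 > 0) := by
        intro hpos
        exact hnotav (r + 1) (Or.inr rfl) ((hpos_iff (r + 1) (Or.inr rfl)).mp hpos)
      rw [if_neg h1, if_neg h2]
      exact ih hrs' M D hM hcnt
        (fun s hs r' hr' => hdead s hs r' (List.mem_cons_of_mem _ hr'))
        (fun r' hr' => hrsMU r' (List.mem_cons_of_mem _ hr')) c
    | some p =>
      obtain ⟨v, M'⟩ := p
      obtain ⟨pre, hMeq, hqv, hpre⟩ := findSplit_eq_some _ _ _ _ hfs
      have hq : (r - v).natAbs = 1 ∧ v ∉ U := by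
        have h := hqv
        simp [qPred] at h
        exact h
      have hvM : v ∈ M := by rw [hMeq]; exact List.mem_append_right _ (List.mem_cons_self)
      have hvpos : 0 < D.getD v 0 :=
        (hpos_iff v (by omega)).mpr ⟨hvM, hq.2⟩
      have hMsplit := List.pairwise_append.mp (hMeq ▸ hM)
      have hconsPw := List.pairwise_cons.mp hMsplit.2.1
      have hv_leM' : ∀ x ∈ M', v ≤ x := hconsPw.1
      have hM'pw : M'.Pairwise (· ≤ ·) := hconsPw.2
      have hpre_le : ∀ a ∈ pre, a ≤ v := fun a ha => hMsplit.2.2 a ha v (List.mem_cons_self)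
      have hpre_v : v ∉ pre := fun hvp => by rw [hpre v hvp] at hqv; exact Bool.false_ne_true hqv
      have hcount_v : M.count v = M'.count v + 1 := by
        rw [hMeq, List.count_append, List.count_cons_self,
            List.count_eq_zero_of_not_mem hpre_v]
        omega
      have hcount_le : ∀ x : Int, M'.count x ≤ M.count x := by
        intro x
        rw [hMeq, List.count_append, List.count_cons]
        omega
      -- the step discards exactly one copy of v
      have hstep : (if D.getD (r - 1) 0 > 0 then (D.insert (r - 1) (D.getD (r - 1) 0 - 1), c + 1)
          else if D.getD (r + 1) 0 > 0 then (D.insert (r + 1) (D.getD (r + 1) 0 - 1), c + 1)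
          else (D, c)) = (D.insert v (D.getD v 0 - 1), c + 1) := by
        rcases (show v = r - 1 ∨ v = r + 1 by omega) with hv | hv
        · rw [if_pos (hv ▸ hvpos), hv]
        · have h1 : ¬ (D.getD (r - 1) 0 > 0) := by
            intro hpos
            obtain ⟨hmem, hnU⟩ := (hpos_iff (r - 1) (Or.inl rfl)).mp hpos
            have hin : (r - 1) ∈ pre := by
              rw [hMeq] at hmem
              rcases List.mem_append.mp hmem with h | h
              · exact h
              · rcases List.mem_cons.mp h with h | h
                · omega
                · have := hv_leM' _ h; omega
            have hq1 := hpre (r - 1) hin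
            simp [qPred] at hq1
            exact hnU hq1
          rw [if_neg h1, if_pos (hv ▸ hvpos), hv]
      rw [hstep]
      -- re-establish the invariant for rest with M' and the decremented counter
      have hrec := ih hrs' M' (D.insert v (D.getD v 0 - 1)) hM'pw
        (by
          intro x hxU
          rw [PySem.Dict.getD_insert]
          by_cases hxv : x = v
          · subst hxv
            simp only [if_pos rfl]
            have := hcnt x hxU
            omega
          · rw [if_neg hxv]
            have := hcnt x hxU
            have := hcount_le x
            omega)
        (by
          intro s hs r' hr'
          rw [PySem.Dict.getD_insert] at hs
          by_cases hsv : s = v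
          · subst hsv
            rw [if_pos rfl] at hs
            rcases hs with hs | hs
            · exact hdead s (Or.inl (by omega)) r' (List.mem_cons_of_mem _ hr')
            · exact absurd hs.1 hq.2
          · rw [if_neg hsv] at hs
            by_cases hold : (M.count s : Int) < D.getD s 0 ∨ (s ∈ U ∧ 0 < D.getD s 0)
            · exact hdead s hold r' (List.mem_cons_of_mem _ hr')
            · push_neg at hold
              -- s's count dropped: s is a skipped value in pre, hence dead from r on
              have hsU : s ∉ U := by
                intro hsU
                rcases hs with hs | hs
                · exact absurd (by omega : 0 < D.getD s 0) (by simpa using hold.2 hsU)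
                · exact absurd hs.2 (by simpa using hold.2 hsU)
              have hdrop : M'.count s < M.count s := by
                rcases hs with hs | hs
                · have := hold.1; omega
                · exact absurd hs.1 hsU
              have hvs : v ≠ s := fun h => hsv h.symm
              have hspre : s ∈ pre := by
                by_contra hnp
                have : M.count s = M'.count s := by
                  rw [hMeq, List.count_append, List.count_cons,
                      List.count_eq_zero_of_not_mem hnp]
                  simp [hvs]
                omega
              have hqs := hpre s hspre
              simp [qPred] at hqs
              have habs : ¬ (r - s).natAbs = 1 := fun h => hsU (hqs h)
              have hsle : s ≤ v := hpre_le s hspre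
              have hsM : s ∈ M := by rw [hMeq]; exact List.mem_append_left _ hspre
              have hsr : s ≠ r := fun h => hrM (h ▸ hsM)
              have hrr' := hr_rest r' hr'
              constructor <;> omega)
        (by
          intro r' hr'
          obtain ⟨hM0, hU0⟩ := hrsMU r' (List.mem_cons_of_mem _ hr')
          refine ⟨fun h => hM0 ?_, hU0⟩
          rw [hMeq]; exact List.mem_append_right _ (List.mem_cons_of_mem _ h))
        (c + 1)
      rw [hrec]
      ring

lemma guarded_counter (p : Int → Bool) : ∀ (l : List Int) (d : PySem.Dict Int Int),
    l.foldl (fun d x => if p x then d.insert x (d.getD x 0 + 1) else d) d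
    = (l.filter p).foldl (fun d x => d.insert x (d.getD x 0 + 1)) d := by
  intro l
  induction l with
  | nil => intro d; rfl
  | cons x xs ih =>
    intro d
    rw [List.foldl_cons, List.filter_cons]
    by_cases h : p x
    · rw [if_pos h, if_pos (by simp [h]), List.foldl_cons, ih]
    · rw [if_neg h, if_neg (by simp [h]), ih]

theorem solution_eq (n : Int) (lost reserve : List Int) :
    solution n lost reserve = solution_alt n lost reserve := by
  simp only [solution, solution_alt]
  set L := PySem.List.sorted lost (fun x => x) with hL0
  set R := PySem.List.sorted reserve (fun x => x) with hR0
  set U := PySem.Set.inter (PySem.Set.ofList L) (PySem.Set.ofList R) with hU0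
  set both := PySem.Set.inter (PySem.Set.ofList lost) (PySem.Set.ofList reserve) with hB0
  set pb := (fun x => !(PySem.Set.contains both x)) with hpb0
  have hLperm : L.Perm lost := PySem.List.sorted_perm lost (fun x => x) false
  have hRperm : R.Perm reserve := PySem.List.sorted_perm reserve (fun x => x) false
  have hLle : L.Pairwise (fun a b => a ≤ b) := PySem.List.sorted_pairwise lost (fun x => x)
  have hRle : R.Pairwise (fun a b => a ≤ b) := PySem.List.sorted_pairwise reserve (fun x => x)
  have hmemU : ∀ x : Int, x ∈ U ↔ x ∈ lost ∧ x ∈ reserve := by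
    intro x
    rw [hU0, PySem.Set.mem_inter, PySem.Set.mem_ofList, PySem.Set.mem_ofList,
        PySem.List.mem_sorted, PySem.List.mem_sorted]
  have hmemB : ∀ x : Int, x ∈ both ↔ x ∈ lost ∧ x ∈ reserve := by
    intro x
    rw [hB0, PySem.Set.mem_inter, PySem.Set.mem_ofList, PySem.Set.mem_ofList]
  have hcontUB : ∀ x : Int, PySem.Set.contains U x = PySem.Set.contains both x := by
    intro x
    rw [Bool.eq_iff_iff, PySem.Set.contains_iff, PySem.Set.contains_iff, hmemU, hmemB]
  -- A side: the fold is cntA over the sorted lost list, restricted to non-union reserves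
  rw [foldA_eq_cntA L U R 0 0, List.drop_zero, zero_add]
  rw [cntA_filter U R L]
  have hfilt : R.filter (fun r => !(PySem.Set.contains U r)) = R.filter pb :=
    List.filter_congr (fun x _ => by rw [hpb0, hcontUB x])
  rw [hfilt]
  -- B side: its iteration list is the same filtered sorted list
  have hsortfilt : PySem.List.sorted (reserve.filter pb) (fun x => x) = R.filter pb :=
    PySem.List.sorted_id_eq_of_perm_of_pairwise _ _ (hRperm.filter pb) (hRle.filter pb)
  rw [guarded_counter pb lost PySem.Dict.empty, hsortfilt]
  -- the counter dict counts occurrences in the filtered lost list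
  have hD0 : ∀ x : Int, ((lost.filter pb).foldl
      (fun d x => d.insert x (d.getD x 0 + 1)) PySem.Dict.empty).getD x 0
      = ((lost.filter pb).count x : Int) := by
    intro x
    rw [PySem.Dict.getD_foldl_insert_add_one]
    rw [PySem.Dict.getD_empty]
    omega
  have hcntfilt : ∀ x : Int, x ∉ U → (lost.filter pb).count x = lost.count x := by
    intro x hxU
    have hpbx : pb x = true := by
      rw [hpb0]
      simp only [Bool.not_eq_true']
      rw [← Bool.not_eq_true, PySem.Set.contains_iff, hmemB]
      intro hc
      exact hxU ((hmemU x).mpr hc)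
    rw [List.count_filter]    -- shape to check
    simp [hpbx]
  have hcntfiltU : ∀ x : Int, x ∈ U → (lost.filter pb).count x = 0 := by
    intro x hxU
    have hpbx : pb x = false := by
      rw [hpb0]
      simp only [Bool.not_eq_false']
      rw [PySem.Set.contains_iff, hmemB]
      exact (hmemU x).mp hxU
    rw [List.count_eq_zero]
    intro hmem
    rw [List.mem_filter, hpbx] at hmem
    exact Bool.false_ne_true hmem.2
  -- apply the main invariant
  have hmain := main_count U (R.filter pb) (hRle.filter pb) L
    ((lost.filter pb).foldl (fun d x => d.insert x (d.getD x 0 + 1)) PySem.Dict.empty)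
    hLle
    (by
      intro x hxU
      rw [hD0 x, hcntfilt x hxU, hLperm.count_eq]
      )
    (by
      intro s hs
      rw [hD0 s] at hs
      by_cases hsU : s ∈ U
      · rw [hcntfiltU s hsU] at hs
        rcases hs with hs | hs
        · have := Int.natCast_nonneg (L.count s); omega
        · omega
      · rw [hcntfilt s hsU, hLperm.count_eq] at hs
        rcases hs with hs | hs
        · omega
        · exact absurd hs.1 hsU)
    (by
      intro r hr
      obtain ⟨hrR, hpbr⟩ := List.mem_filter.mp hr
      have hrres : r ∈ reserve := (PySem.List.mem_sorted reserve _ false r).mp hrR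
      have hrnl : r ∉ lost := by
        intro hl
        have hpos : PySem.Set.contains both r = true :=
          (PySem.Set.contains_iff both r).mpr ((hmemB r).mpr ⟨hl, hrres⟩)
        have hfalse : pb r = false := by
          rw [hpb0]; simp; exact (PySem.Set.contains_iff both r).mp hpos
        rw [List.mem_filter, hfalse] at hr
        exact Bool.false_ne_true hr.2
      exact ⟨fun h => hrnl ((PySem.List.mem_sorted lost _ false r).mp h),
        fun h => hrnl ((hmemU r).mp h).1⟩)
    0
  rw [hmain]
  -- lengths: |L| = |lost| and |U| = |both|
  have hLlen : L.length = lost.length := hLperm.length_eq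
  have hUlen : U.length = both.length := by
    have hperm : (PySem.Set.ofList L).Perm (PySem.Set.ofList lost) := by
      apply (List.perm_ext_iff_of_nodup (PySem.Set.nodup_ofList L) (PySem.Set.nodup_ofList lost)).mpr
      intro a
      rw [PySem.Set.mem_ofList, PySem.Set.mem_ofList, PySem.List.mem_sorted]
    have hpred : ∀ x : Int, (PySem.Set.ofList R).contains x = (PySem.Set.ofList reserve).contains x := by
      intro x
      rw [Bool.eq_iff_iff]
      constructor
      · intro h
        have := (PySem.Set.contains_iff _ x).mp h
        rw [PySem.Set.mem_ofList, PySem.List.mem_sorted] at this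
        exact (PySem.Set.contains_iff _ x).mpr ((PySem.Set.mem_ofList _ x).mpr this)
      · intro h
        have := (PySem.Set.contains_iff _ x).mp h
        rw [PySem.Set.mem_ofList] at this
        exact (PySem.Set.contains_iff _ x).mpr
          ((PySem.Set.mem_ofList _ x).mpr ((PySem.List.mem_sorted reserve _ false x).mpr this))
    have h1 : U = List.filter (fun x => (PySem.Set.ofList R).contains x) (PySem.Set.ofList L) := rfl
    have h2 : both = List.filter (fun x => (PySem.Set.ofList reserve).contains x) (PySem.Set.ofList lost) := rfl
    rw [h1, h2]
    rw [List.filter_congr (fun x _ => hpred x)]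
    exact (hperm.filter _).length_eq
  rw [hLlen, hUlen]
  ring

-- ===== VERDICT (by name: the statement is the Claim_ definition above) =====
theorem solution_spec : Claim_equal_solution := by
  intro n lost reserve _
  unfold Spec_solution
  exact solution_eq n lost reserve
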